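-- pv_equiv track=rewrite | github.com/AnArza/Python-IPONWEB | src/Homework_4.py | delete_an_anagram
-- ===== SOURCE A (Python) =====
-- def str_to_dict(string):
--     dict = {}
--     for char in string:
--         dict.update({char: 0})
--     for key in dict.keys():
--         for char in string:
--             if char == key:
--                 dict[key] += 1
--     return dict
--
-- def are_anagrams(str1, str2):
--     if len(str1) != len(str2):
--         return False
--     dict1 = str_to_dict(str1)
--     dict2 = str_to_dict(str2)
--
--     return dict1 == dict2
--
-- def delete_an_anagram(words):
--     res = []
--     i = 1
--     while True:
--         if i == len(words):
--             break
--         if are_anagrams(words[i - 1], words[i]):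
--             words.pop(i)
--         else:
--             i += 1
--
--     return words
-- ===== SOURCE B (Python) =====
-- def delete_an_anagram(words):
--     res = [words[0]]
--     last = sorted(words[0])
--     for w in words[1:]:
--         sw = sorted(w)
--         if sw != last:
--             res.append(w)
--             last = sw
--     words[:] = res
--     return words
-- ===== Notes on version B (the rewrite author's own statement) =====
-- stated objective: faster
-- what changed: Single forward pass that builds a new result list, comparing each word's sorted character list against the last kept word's, instead of A's in-place pop loop that rebuilds a character-count dictionary (itself quadratic per word) for every adjacent pair; B reproduces A's in-place mutation via words[:] = res.
import Mathlib
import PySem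

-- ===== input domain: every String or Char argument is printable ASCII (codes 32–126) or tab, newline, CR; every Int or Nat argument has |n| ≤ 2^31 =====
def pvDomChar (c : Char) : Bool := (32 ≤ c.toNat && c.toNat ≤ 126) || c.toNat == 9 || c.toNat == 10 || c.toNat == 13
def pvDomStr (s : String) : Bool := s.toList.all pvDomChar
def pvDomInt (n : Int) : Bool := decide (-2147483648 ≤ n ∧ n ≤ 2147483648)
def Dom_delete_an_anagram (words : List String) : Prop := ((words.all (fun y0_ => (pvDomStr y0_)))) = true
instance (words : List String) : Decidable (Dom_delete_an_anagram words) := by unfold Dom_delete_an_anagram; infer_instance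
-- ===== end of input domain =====

-- B removes consecutive anagrams in one forward pass building a new list (comparing sorted
-- character lists against the last kept word) instead of A's in-place pop loop with per-pair
-- count dictionaries; equivalence is about the return value (B's Python reproduces A's
-- in-place mutation via words[:] = res).

-- ===== PORT A =====
-- str_to_dict: first loop inserts every char with value 0, second loop (over the keys)
-- re-scans the string incrementing the key's count.
def strToDict (s : String) : PySem.Dict Char Int :=
  let d := s.toList.foldl (fun d c => d.insert c 0) PySem.Dict.empty
  d.keys.foldl
    (fun d k => s.toList.foldl (fun d c => if c == k then d.modify k 0 (· + 1) else d) d) d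

-- Python 'dict1 == dict2' compares the two dicts as mappings (order-insensitive).
def dictEqPy (d1 d2 : PySem.Dict Char Int) : Bool :=
  d1.items.all (fun p => d2.get? p.1 == some p.2) &&
  d2.items.all (fun p => d1.get? p.1 == some p.2)

def areAnagrams (s1 s2 : String) : Bool :=
  if PySem.Str.len s1 ≠ PySem.Str.len s2 then false
  else dictEqPy (strToDict s1) (strToDict s2)

-- the while-loop: index i, pop at i when consecutive words are anagrams
def anagramLoop (words : List String) (i : Nat) : List String :=
  if h : words.length ≤ i then words
  else if areAnagrams (words.getD (i - 1) "") (words.getD i "") then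
    anagramLoop (words.take i ++ words.drop (i + 1)) i
  else
    anagramLoop words (i + 1)
termination_by words.length - i
decreasing_by
  · simp only [List.length_append, List.length_take, List.length_drop]; omega
  · omega

def delete_an_anagram (words : List String) : List String := anagramLoop words 1

-- ===== PORT B =====
def sortedChars (s : String) : List Char := PySem.List.sorted s.toList (fun c => c) false

def delete_an_anagram_alt (words : List String) : List String :=
  match words with
  | [] => []  -- unreachable under Pre_ (Python B raises IndexError on [])
  | w :: rest =>
    (rest.foldl
      (fun (st : List String × List Char) w' =>
        let sw := sortedChars w'
        if sw = st.2 then st else (st.1 ++ [w'], sw))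
      ([w], sortedChars w)).1

-- ===== PRECONDITION & SPEC =====
-- Pre_ excludes only the empty list, on which Python A raises IndexError (words[0]).
def Pre_delete_an_anagram (words : List String) : Prop := words ≠ []
instance (words : List String) : Decidable (Pre_delete_an_anagram words) := by
  unfold Pre_delete_an_anagram; infer_instance

def pvWitness_delete_an_anagram : List String := ["listen", "silent", "cat"]

def Spec_delete_an_anagram (words : List String) (out : List String) : Prop :=
  out = delete_an_anagram_alt words
instance (words : List String) (out : List String) : Decidable (Spec_delete_an_anagram words out) := by
  unfold Spec_delete_an_anagram; infer_instance

-- ===== CLAIM (what is proved, stated in full; the proofs are below) =====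
def Claim_equal_delete_an_anagram : Prop :=
  ∀ (words : List String), Dom_delete_an_anagram words → Pre_delete_an_anagram words →
    Spec_delete_an_anagram words (delete_an_anagram words)

-- ===== LEMMAS AND PROOFS =====

-- the inner fold of strToDict's second loop preserves the key list when k is already a key
lemma keys_innerFold (s : List Char) (k : Char) (d : PySem.Dict Char Int)
    (hk : k ∈ d.keys) :
    (s.foldl (fun d c => if c == k then d.modify k 0 (· + 1) else d) d).keys = d.keys := by
  induction s generalizing d with
  | nil => rfl
  | cons c t ih =>
    simp only [List.foldl_cons]
    by_cases hck : c = k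
    · rw [if_pos (by simp [hck])]
      have hkeys : (d.modify k 0 (· + 1)).keys = d.keys := by
        rw [PySem.Dict.keys_modify, PySem.Dict.keys_insert_of_contains]
        rw [PySem.Dict.contains_iff_mem_keys]; exact hk
      rw [ih _ (by rw [hkeys]; exact hk), hkeys]
    · rw [if_neg (by simp [hck]), ih _ hk]

lemma keys_outerFold (ks : List Char) (s : List Char) (d : PySem.Dict Char Int)
    (hks : ∀ k ∈ ks, k ∈ d.keys) :
    (ks.foldl (fun d k => s.foldl (fun d c => if c == k then d.modify k 0 (· + 1) else d) d) d).keys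
      = d.keys := by
  induction ks generalizing d with
  | nil => rfl
  | cons k t ih =>
    simp only [List.foldl_cons]
    have h1 := keys_innerFold s k d (hks k (by simp))
    rw [ih _ (fun k' hk' => by rw [h1]; exact hks k' (by simp [hk']))]
    exact h1

lemma keys_firstFold (l : List Char) :
    ((l.foldl (fun d c => d.insert c (0 : Int)) PySem.Dict.empty)).keys = PySem.Set.ofList l := by
  rw [PySem.Dict.keys_foldl_insert l (fun _ _ => (0 : Int)) PySem.Dict.empty]
  rw [PySem.Dict.keys_empty, PySem.Set.update_nil_left]

lemma keys_strToDict (s : String) : (strToDict s).keys = PySem.Set.ofList s.toList := by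
  unfold strToDict
  rw [keys_outerFold _ _ _ (fun k hk => hk), keys_firstFold]

lemma nodup_keys_strToDict (s : String) : (strToDict s).keys.Nodup := by
  rw [keys_strToDict]; exact PySem.Set.nodup_ofList s.toList

lemma getD_zero_foldl_insert_zero (l : List Char) (d : PySem.Dict Char Int)
    (h : ∀ k, d.getD k 0 = 0) (k : Char) :
    (l.foldl (fun d c => d.insert c (0 : Int)) d).getD k 0 = 0 := by
  induction l generalizing d with
  | nil => exact h k
  | cons c t ih =>
    simp only [List.foldl_cons]
    exact ih _ (fun k' => by rw [PySem.Dict.getD_insert]; split <;> simp [h])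

lemma getD_inner_count (s : List Char) (k j : Char) (d : PySem.Dict Char Int) :
    (s.foldl (fun d c => if c == k then d.modify k 0 (· + 1) else d) d).getD j 0 =
      if j = k then d.getD j 0 + s.count k else d.getD j 0 := by
  induction s generalizing d with
  | nil => simp
  | cons c t ih =>
    simp only [List.foldl_cons, List.count_cons]
    by_cases hck : c = k
    · rw [if_pos (by simp [hck]), ih]
      by_cases hjk : j = k
      · subst hjk
        rw [PySem.Dict.getD_modify_self]
        simp [hck]; ring
      · rw [PySem.Dict.getD_modify_of_ne d 0 _ hjk]
        simp [hjk]
    · rw [if_neg (by simp [hck]), ih]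
      by_cases hjk : j = k <;> simp [hjk, hck]

lemma getD_outer_count (ks : List Char) (s : List Char) (d : PySem.Dict Char Int)
    (hnd : ks.Nodup) (j : Char) :
    (ks.foldl (fun d k => s.foldl (fun d c => if c == k then d.modify k 0 (· + 1) else d) d) d).getD j 0 =
      if j ∈ ks then d.getD j 0 + s.count j else d.getD j 0 := by
  induction ks generalizing d with
  | nil => simp
  | cons k t ih =>
    have hk : k ∉ t := (List.nodup_cons.mp hnd).1
    simp only [List.foldl_cons, ih _ (List.nodup_cons.mp hnd).2, getD_inner_count, List.mem_cons]
    by_cases hjk : j = k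
    · subst hjk
      simp [hk]
    · simp [hjk]

lemma getD_strToDict (s : String) (c : Char) :
    (strToDict s).getD c 0 = s.toList.count c := by
  unfold strToDict
  simp only []
  rw [getD_outer_count _ _ _ (by rw [keys_firstFold]; exact PySem.Set.nodup_ofList _)]
  rw [getD_zero_foldl_insert_zero _ _ (fun k => by rw [PySem.Dict.getD_empty])]
  rw [keys_firstFold]
  by_cases hc : c ∈ s.toList
  · rw [if_pos ((PySem.Set.mem_ofList _ _).mpr hc)]; ring
  · rw [if_neg (fun h => hc ((PySem.Set.mem_ofList _ _).mp h))]
    rw [List.count_eq_zero_of_not_mem hc]; rfl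

lemma get?_strToDict (s : String) (c : Char) :
    (strToDict s).get? c = if c ∈ s.toList then some (s.toList.count c : Int) else none := by
  by_cases hc : c ∈ s.toList
  · rw [if_pos hc]
    have hmem : c ∈ (strToDict s).keys := by
      rw [keys_strToDict]; exact (PySem.Set.mem_ofList _ _).mpr hc
    obtain ⟨v, hv⟩ : ∃ v, (strToDict s).get? c = some v := by
      cases h : (strToDict s).get? c with
      | none => exact absurd ((PySem.Dict.get?_eq_none_iff_not_mem_keys _ _).mp h) (by simp [hmem])
      | some v => exact ⟨v, rfl⟩
    have := getD_strToDict s c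
    rw [PySem.Dict.getD_eq_get?_getD, hv] at this
    simp only [Option.getD_some] at this
    rw [hv, this]
  · rw [if_neg hc]
    rw [PySem.Dict.get?_eq_none_iff_not_mem_keys, keys_strToDict]
    exact fun h => hc ((PySem.Set.mem_ofList _ _).mp h)

lemma dictEqPy_iff (s t : String) :
    dictEqPy (strToDict s) (strToDict t) = true ↔
      ∀ c, (strToDict s).get? c = (strToDict t).get? c := by
  unfold dictEqPy
  rw [Bool.and_eq_true, List.all_eq_true, List.all_eq_true]
  constructor
  · rintro ⟨h1, h2⟩ c
    cases hg : (strToDict s).get? c with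
    | some v =>
      have h := h1 (c, v) (PySem.Dict.mem_items_of_get?_eq_some _ hg)
      simp only [beq_iff_eq] at h
      exact h.symm
    | none =>
      cases hg2 : (strToDict t).get? c with
      | none => rfl
      | some w =>
        have := h2 (c, w) (PySem.Dict.mem_items_of_get?_eq_some _ hg2)
        simp only [beq_iff_eq] at this
        rw [hg] at this; exact absurd this (by simp)
  · intro h
    refine ⟨fun p hp => ?_, fun p hp => ?_⟩
    · have := (PySem.Dict.get?_eq_some_iff_mem_items _ p.1 p.2 (nodup_keys_strToDict s)).mpr hp
      simp [← h p.1, this]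
    · have := (PySem.Dict.get?_eq_some_iff_mem_items _ p.1 p.2 (nodup_keys_strToDict t)).mpr hp
      simp [h p.1, this]

lemma areAnagrams_iff_perm (s t : String) :
    areAnagrams s t = true ↔ s.toList.Perm t.toList := by
  unfold areAnagrams
  by_cases hlen : s.toList.length = t.toList.length
  · have hL : PySem.Str.len s = PySem.Str.len t := by
      rw [PySem.Str.len_eq, PySem.Str.len_eq, hlen]
    rw [if_neg (by simpa using hL), dictEqPy_iff]
    constructor
    · intro h
      rw [List.perm_iff_count]
      intro c
      have := h c
      rw [get?_strToDict, get?_strToDict] at this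
      by_cases hs : c ∈ s.toList <;> by_cases ht : c ∈ t.toList <;>
        simp only [hs, ht, if_pos, if_false] at this ⊢
      · exact_mod_cast Option.some_injective _ this
      · simp at this
      · simp at this
      · rw [List.count_eq_zero_of_not_mem hs, List.count_eq_zero_of_not_mem ht]
    · intro hperm c
      rw [get?_strToDict, get?_strToDict]
      have hcnt := (List.perm_iff_count.mp hperm) c
      by_cases hs : c ∈ s.toList
      · rw [if_pos hs, if_pos (hperm.mem_iff.mp hs), hcnt]
      · rw [if_neg hs, if_neg (fun h => hs (hperm.mem_iff.mpr h))]
  · have hL : PySem.Str.len s ≠ PySem.Str.len t := by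
      rw [PySem.Str.len_eq, PySem.Str.len_eq]
      exact fun h => hlen (by exact_mod_cast h)
    rw [if_pos hL]
    exact ⟨fun h => absurd h (by simp), fun hperm => absurd hperm.length_eq hlen⟩

lemma areAnagrams_iff_sorted (s t : String) :
    areAnagrams s t = true ↔ sortedChars s = sortedChars t := by
  rw [areAnagrams_iff_perm, ← PySem.List.sorted_id_eq_sorted_id_iff_perm]
  exact Iff.rfl

-- the common skeleton: keep w unless its sorted chars equal the last kept word's
def goB (last : List Char) : List String → List String
  | [] => []
  | w :: t => if sortedChars w = last then goB last t else w :: goB (sortedChars w) t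

lemma foldB_eq_goB (rest : List String) (acc : List String) (last : List Char) :
    (rest.foldl
      (fun (st : List String × List Char) w' =>
        let sw := sortedChars w'
        if sw = st.2 then st else (st.1 ++ [w'], sw))
      (acc, last)).1 = acc ++ goB last rest := by
  induction rest generalizing acc last with
  | nil => simp [goB]
  | cons w t ih =>
    simp only [List.foldl_cons, goB]
    by_cases h : sortedChars w = last
    · simp only [h, if_true]
      exact ih acc last
    · simp only [if_neg h]
      rw [ih (acc ++ [w]) (sortedChars w), List.append_assoc]
      rfl

lemma anagramLoop_eq_goB (n : Nat) (words : List String) (i : Nat)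
    (hn : words.length - i = n) (h1 : 1 ≤ i) (h2 : i ≤ words.length) :
    anagramLoop words i =
      words.take i ++ goB (sortedChars (words.getD (i - 1) "")) (words.drop i) := by
  induction n generalizing words i with
  | zero =>
    have hlen : i = words.length := by omega
    rw [anagramLoop, dif_pos (by omega)]
    subst hlen
    simp [goB]
  | succ m ih =>
    have hlt : i < words.length := by omega
    rw [anagramLoop, dif_neg (by omega)]
    have ha : words.getD (i - 1) "" = words[i - 1]'(by omega) := List.getD_eq_getElem _ _ (by omega)
    have hb : words.getD i "" = words[i]'hlt := List.getD_eq_getElem _ _ hlt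
    have hdrop : words.drop i = words[i]'hlt :: words.drop (i + 1) :=
      List.drop_eq_getElem_cons hlt
    have hti : (words.take i).length = i := by simp; omega
    by_cases hA : areAnagrams (words.getD (i - 1) "") (words.getD i "")
    · rw [if_pos hA]
      have hsort : sortedChars (words.getD (i - 1) "") = sortedChars (words.getD i "") :=
        (areAnagrams_iff_sorted _ _).mp hA
      set ws' := words.take i ++ words.drop (i + 1) with hws'
      have hlen' : ws'.length = words.length - 1 := by
        simp [hws']; omega
      have htake' : ws'.take i = words.take i := by
        rw [hws', List.take_append_of_le_length (by omega), List.take_take]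
        simp
      have hdrop' : ws'.drop i = words.drop (i + 1) := by
        rw [hws', List.drop_append_of_le_length (by omega)]
        have : (words.take i).drop i = [] := by simp
        rw [this, List.nil_append]
      have hgetD' : ws'.getD (i - 1) "" = words.getD (i - 1) "" := by
        rw [List.getD_eq_getElem?_getD, List.getD_eq_getElem?_getD]
        have h4 : ws'[i - 1]? = words[i - 1]? := by
          have e1 : (ws'.take i)[i - 1]? = ws'[i - 1]? := by
            rw [List.getElem?_take, if_pos (by omega)]
          have e2 : (words.take i)[i - 1]? = words[i - 1]? := by
            rw [List.getElem?_take, if_pos (by omega)]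
          rw [← e1, htake', e2]
        rw [h4]
      rw [ih ws' i (by omega) h1 (by omega), htake', hdrop', hgetD', hdrop]
      conv_rhs => rw [goB]
      rw [if_pos (by rw [← hb]; exact hsort.symm)]
    · rw [if_neg hA]
      have hsne : sortedChars (words[i]'hlt) ≠ sortedChars (words.getD (i - 1) "") := by
        intro h
        exact hA ((areAnagrams_iff_sorted _ _).mpr (by rw [hb]; exact h.symm))
      rw [ih words (i + 1) (by omega) (by omega) (by omega)]
      have hgd : words.getD (i + 1 - 1) "" = words[i]'hlt := by simpa using hb
      rw [hgd, hdrop]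
      conv_rhs => rw [goB]
      rw [if_neg hsne, List.take_succ_eq_append_getElem hlt, List.append_assoc]
      rfl

-- ===== VERDICT (by name: the statement is the Claim_ definition above) =====
theorem delete_an_anagram_spec : Claim_equal_delete_an_anagram := by
  intro words _ hpre
  cases words with
  | nil => exact absurd rfl hpre
  | cons w rest =>
    unfold Spec_delete_an_anagram delete_an_anagram
    rw [anagramLoop_eq_goB ((w :: rest).length - 1) (w :: rest) 1 rfl (by omega) (by simp)]
    simp only [delete_an_anagram_alt]
    rw [foldB_eq_goB]
    simp
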